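-- pv_equiv track=rewrite | github.com/yuping3252/CodeDataSearchEngine | tables/merge_lst.py | left_col_grp_lst
-- ===== SOURCE A (Python) =====
-- def left_col_grp_lst(c_lst, c_nbr):
--     grp_lst = []
--     c = 0
--     j = 0
--     for cols in c_lst:
--         c_left = c
--         for col in cols:
--             if c == c_nbr:
--                 j = 1
--                 break
--             c += 1
--         if j == 1:
--             if c_left == c:
--                 break
--             else:
--                 cols_ = []
--                 for c_ in range(0, c - c_left):
--                     cols_.append(cols[c_])
--                 grp_lst.append(cols_)
--                 break
--         grp_lst.append(cols)
--     return grp_lst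
-- ===== SOURCE B (Python) =====
-- def left_col_grp_lst(c_lst, c_nbr):
--     grp_lst = []
--     c = 0
--     for cols in c_lst:
--         r = c_nbr - c
--         n = len(cols)
--         if r < 0 or r >= n:
--             grp_lst.append(cols)
--             c += n
--         else:
--             if r > 0:
--                 grp_lst.append(cols[:r])
--             break
--     return grp_lst
-- ===== Notes on version B (the rewrite author's own statement) =====
-- stated objective: simpler
-- what changed: Replaces A's nested per-column counting loop (with a break flag j and an element-by-element copy loop) by a single flat pass over the groups that compares the remaining budget c_nbr - c with len(cols) and slices once.
import Mathlib
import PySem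

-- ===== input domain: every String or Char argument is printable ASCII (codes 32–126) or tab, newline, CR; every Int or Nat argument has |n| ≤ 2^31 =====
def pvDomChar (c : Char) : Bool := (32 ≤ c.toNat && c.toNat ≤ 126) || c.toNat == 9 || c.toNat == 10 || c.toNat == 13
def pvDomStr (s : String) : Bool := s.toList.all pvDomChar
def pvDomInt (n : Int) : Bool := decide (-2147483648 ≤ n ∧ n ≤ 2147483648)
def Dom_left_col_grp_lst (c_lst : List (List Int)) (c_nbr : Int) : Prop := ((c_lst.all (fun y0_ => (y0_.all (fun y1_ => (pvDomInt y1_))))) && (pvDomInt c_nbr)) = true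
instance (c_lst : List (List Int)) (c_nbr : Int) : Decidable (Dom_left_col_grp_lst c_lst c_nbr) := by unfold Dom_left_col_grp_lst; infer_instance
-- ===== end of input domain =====

-- B replaces A's nested per-column counting loop by one flat pass that compares the
-- remaining budget c_nbr - c with len(cols) per group (objective: simpler).

-- ===== PORT A =====
-- inner 'for col in cols' loop: counter c, flag j; breaks when c == c_nbr
def pvInnerA (c_nbr : Int) : List Int → Int → Int → Int × Int
  | [], c, j => (c, j)
  | _ :: rest, c, j => if c = c_nbr then (c, 1) else pvInnerA c_nbr rest (c + 1) j

-- 'for c_ in range(0, c - c_left): cols_.append(cols[c_])'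
-- (cols[c_] is always in range here, so the getD default 0 is never used)
def pvColsA (cols : List Int) (k : Int) : List Int :=
  (PySem.List.pyRange 0 k 1).foldl (fun cols_ c_ => cols_ ++ [PySem.List.pyGetD cols c_ 0]) []

def pvGoA (c_nbr : Int) : List (List Int) → List (List Int) → Int → Int → List (List Int)
  | [], grp_lst, _, _ => grp_lst
  | cols :: rest, grp_lst, c, j =>
    let c_left := c
    let p := pvInnerA c_nbr cols c j
    if p.2 = 1 then
      if c_left = p.1 then grp_lst
      else grp_lst ++ [pvColsA cols (p.1 - c_left)]
    else pvGoA c_nbr rest (grp_lst ++ [cols]) p.1 p.2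

def left_col_grp_lst (c_lst : List (List Int)) (c_nbr : Int) : List (List Int) :=
  pvGoA c_nbr c_lst [] 0 0

-- ===== PORT B =====
def pvGoB (c_nbr : Int) : List (List Int) → List (List Int) → Int → List (List Int)
  | [], grp_lst, _ => grp_lst
  | cols :: rest, grp_lst, c =>
    let r := c_nbr - c
    let n : Int := cols.length
    if r < 0 ∨ r ≥ n then pvGoB c_nbr rest (grp_lst ++ [cols]) (c + n)
    else if r > 0 then grp_lst ++ [PySem.List.slice cols none (some r)]
    else grp_lst

def left_col_grp_lst_alt (c_lst : List (List Int)) (c_nbr : Int) : List (List Int) :=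
  pvGoB c_nbr c_lst [] 0

-- ===== PRECONDITION & SPEC =====
def Spec_left_col_grp_lst (c_lst : List (List Int)) (c_nbr : Int) (out : List (List Int)) : Prop := out = left_col_grp_lst_alt c_lst c_nbr
instance (c_lst : List (List Int)) (c_nbr : Int) (out : List (List Int)) : Decidable (Spec_left_col_grp_lst c_lst c_nbr out) := by unfold Spec_left_col_grp_lst; infer_instance

-- ===== CLAIM (what is proved, stated in full; the proofs are below) =====
def Claim_equal_left_col_grp_lst : Prop := ∀ (c_lst : List (List Int)) (c_nbr : Int), Dom_left_col_grp_lst c_lst c_nbr → Spec_left_col_grp_lst c_lst c_nbr (left_col_grp_lst c_lst c_nbr)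

-- ===== LEMMAS AND PROOFS =====

-- the inner loop hits c_nbr iff c ≤ c_nbr < c + len; then it stops at c_nbr with j = 1
theorem pvInnerA_hit (c_nbr : Int) (cols : List Int) (c j : Int)
    (h1 : c ≤ c_nbr) (h2 : c_nbr < c + cols.length) :
    pvInnerA c_nbr cols c j = (c_nbr, 1) := by
  induction cols generalizing c with
  | nil => simp at h2; omega
  | cons x xs ih =>
    simp only [pvInnerA]
    by_cases h : c = c_nbr
    · simp [h]
    · rw [if_neg h]
      exact ih (c + 1) (by omega) (by simp at h2 ⊢; omega)

theorem pvInnerA_miss (c_nbr : Int) (cols : List Int) (c j : Int)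
    (h : ¬ (c ≤ c_nbr ∧ c_nbr < c + cols.length)) :
    pvInnerA c_nbr cols c j = (c + cols.length, j) := by
  induction cols generalizing c with
  | nil => simp [pvInnerA]
  | cons x xs ih =>
    simp only [pvInnerA]
    rw [if_neg (by simp at h; omega)]
    rw [ih (c + 1) (by simp at h ⊢; omega)]
    simp; omega

-- A's element-by-element copy of the first (c_nbr - c) columns is the slice cols[:r]
theorem pvColsA_eq_take (cols : List Int) (k : Nat) (hk : k ≤ cols.length) :
    pvColsA cols (k : Int) = cols.take k := by
  induction k with
  | zero => simp [pvColsA, PySem.List.pyRange]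
  | succ n ih =>
    unfold pvColsA
    push_cast
    rw [PySem.List.pyRange_one_append 0 n (n+1) (by omega) (by omega), List.foldl_append]
    rw [PySem.List.pyRange_one_cons (show (n:Int) < n+1 by omega)]
    have hnil : PySem.List.pyRange ((n:Int)+1) ((n:Int)+1) = [] := by simp
    rw [hnil]
    simp only [List.foldl_cons, List.foldl_nil]
    have hih := ih (by omega)
    unfold pvColsA at hih
    rw [hih]
    rw [PySem.List.pyGetD_natCast]
    rw [List.getD_eq_getElem _ _ (by omega)]
    rw [List.take_add_one, List.getElem?_eq_getElem (by omega)]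
    simp

theorem pvColsA_eq_take' (cols : List Int) (k : Int) (h0 : 0 ≤ k) (h : k ≤ cols.length) :
    pvColsA cols k = cols.take k.toNat := by
  have := pvColsA_eq_take cols k.toNat (by omega)
  rwa [Int.toNat_of_nonneg h0] at this

theorem pvGo_eq (c_nbr : Int) (rest : List (List Int)) (grp : List (List Int)) (c : Int) :
    pvGoA c_nbr rest grp c 0 = pvGoB c_nbr rest grp c := by
  induction rest generalizing grp c with
  | nil => rfl
  | cons cols xs ih =>
    simp only [pvGoA, pvGoB]
    by_cases hhit : c ≤ c_nbr ∧ c_nbr < c + cols.length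
    · rw [pvInnerA_hit c_nbr cols c 0 hhit.1 hhit.2]
      have e2 : ((c_nbr, (1:Int)).2) = 1 := rfl
      have e1 : ((c_nbr, (1:Int)).1) = c_nbr := rfl
      rw [e2, e1, if_pos rfl]
      rw [if_neg (show ¬(c_nbr - c < 0 ∨ c_nbr - c ≥ (cols.length : Int)) by omega)]
      by_cases h0 : c = c_nbr
      · rw [if_pos h0, if_neg (show ¬ c_nbr - c > 0 by omega)]
      · rw [if_neg h0, if_pos (show c_nbr - c > 0 by omega)]
        rw [PySem.List.slice_to cols (by omega)]
        rw [pvColsA_eq_take' cols (c_nbr - c) (by omega) (by omega)]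
    · rw [pvInnerA_miss c_nbr cols c 0 hhit]
      have e2 : ((c + (cols.length : Int), (0:Int)).2) = 0 := rfl
      have e1 : ((c + (cols.length : Int), (0:Int)).1) = c + cols.length := rfl
      rw [e2, e1, if_neg (by norm_num), if_pos (show c_nbr - c < 0 ∨ c_nbr - c ≥ (cols.length : Int) by omega)]
      exact ih _ _

-- ===== VERDICT (by name: the statement is the Claim_ definition above) =====
theorem left_col_grp_lst_spec : Claim_equal_left_col_grp_lst := by
  intro c_lst c_nbr _
  unfold Spec_left_col_grp_lst left_col_grp_lst left_col_grp_lst_alt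
  exact pvGo_eq c_nbr c_lst [] 0
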